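-- pv_equiv track=rewrite | github.com/arc-pts/ffrd-kanawha-stac | ffrd_stac/utils.py | intersect_dicts
-- ===== SOURCE A (Python) =====
-- import copy
-- from typing import Any, List
--
-- def intersect_dicts(dicts: List[dict]) -> dict:
--     results = copy.deepcopy(dicts[0])
--     for d in dicts[1:]:
--         for k, v in d.items():
--             if k in results:
--                 if results[k] != v:
--                     results[k] = None
--     return results
-- ===== SOURCE B (Python) =====
-- import copy
-- from typing import Any, List
--
-- def intersect_dicts(dicts: List[dict]) -> dict:
--     results = copy.deepcopy(dicts[0])
--     rest = dicts[1:]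
--     for k in results:
--         if any(k in d and d[k] != results[k] for d in rest):
--             results[k] = None
--     return results
-- ===== Notes on version B (the rewrite author's own statement) =====
-- stated objective: simpler
-- what changed: Transposed loop structure: instead of scanning every later dict item by item and repeatedly overwriting the accumulator, B iterates once over the keys of the first dict (the only keys that can survive) and nulls a key with a single short-circuit existential test over the remaining dicts; there are no sequential in-place comparisons against an already-modified accumulator.
import Mathlib
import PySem

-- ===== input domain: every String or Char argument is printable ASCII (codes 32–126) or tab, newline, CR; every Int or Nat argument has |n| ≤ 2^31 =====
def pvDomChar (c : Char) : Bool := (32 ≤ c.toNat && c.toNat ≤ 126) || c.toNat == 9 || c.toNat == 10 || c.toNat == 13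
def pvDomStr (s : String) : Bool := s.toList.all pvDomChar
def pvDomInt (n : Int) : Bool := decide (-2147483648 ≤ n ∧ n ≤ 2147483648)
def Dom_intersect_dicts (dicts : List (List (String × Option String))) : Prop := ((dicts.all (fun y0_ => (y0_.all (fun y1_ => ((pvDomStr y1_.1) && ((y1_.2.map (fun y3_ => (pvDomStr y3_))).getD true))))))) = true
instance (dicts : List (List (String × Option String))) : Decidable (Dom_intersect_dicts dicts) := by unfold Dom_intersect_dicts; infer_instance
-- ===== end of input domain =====

-- B transposes the loops: one pass over the first dict's keys with a short-circuit
-- existential test per key, instead of A's per-dict item scans with in-place updates.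

-- ===== PORT A =====
-- inner update of A's nested loop: Python's  if k in results: if results[k] != v: results[k] = None
def pvUpdA (results : PySem.Dict String (Option String)) (kv : String × Option String) :
    PySem.Dict String (Option String) :=
  if results.contains kv.1 then
    if results.get? kv.1 != some kv.2 then results.insert kv.1 none else results
  else results

def intersect_dicts (dicts : List (List (String × Option String))) : List (String × Option String) :=
  match dicts with
  | [] => []   -- Python raises IndexError here (dicts[0]); excluded by Pre_
  | d0 :: rest =>
    (rest.foldl (fun results d => d.foldl pvUpdA results) (PySem.Dict.mk d0)).items

-- ===== PORT B =====
-- Python B's per-dict test:  k in d and d[k] != results[k]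
def pvBadB (kv : String × Option String) (d : List (String × Option String)) : Bool :=
  (PySem.Dict.mk d).contains kv.1 && ((PySem.Dict.mk d).get? kv.1 != some kv.2)

def intersect_dicts_alt (dicts : List (List (String × Option String))) : List (String × Option String) :=
  match dicts with
  | [] => []   -- B likewise indexes dicts[0]; excluded by Pre_
  | d0 :: rest =>
    d0.map (fun kv => if rest.any (pvBadB kv) then (kv.1, (none : Option String)) else kv)

-- ===== PRECONDITION & SPEC =====
-- Pre_ excludes the empty list, on which A (and B) raises IndexError; the Nodup conjunct is
-- the dict-encoding invariant (a Python dict never has duplicate keys), not a narrowing.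
def Pre_intersect_dicts (dicts : List (List (String × Option String))) : Prop :=
  dicts ≠ [] ∧ ∀ d ∈ dicts, (d.map Prod.fst).Nodup
instance (dicts : List (List (String × Option String))) : Decidable (Pre_intersect_dicts dicts) := by
  unfold Pre_intersect_dicts; infer_instance

def pvWitness_intersect_dicts : (List (List (String × Option String))) :=
  [[("a", some "1"), ("b", none)], [("a", some "2")]]

def Spec_intersect_dicts (dicts : List (List (String × Option String))) (out : List (String × Option String)) : Prop := out = intersect_dicts_alt dicts
instance (dicts : List (List (String × Option String))) (out : List (String × Option String)) : Decidable (Spec_intersect_dicts dicts out) := by unfold Spec_intersect_dicts; infer_instance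

-- ===== CLAIM (what is proved, stated in full; the proofs are below) =====
def Claim_equal_intersect_dicts : Prop := ∀ (dicts : List (List (String × Option String))), Dom_intersect_dicts dicts → Pre_intersect_dicts dicts → Spec_intersect_dicts dicts (intersect_dicts dicts)

-- ===== LEMMAS AND PROOFS =====

-- One inner loop of A over a later dict d, started on a dict D with unique keys, acts
-- entrywise on D.items as B's per-dict test against each entry's ORIGINAL value
-- (d's keys are unique, so at most one item of d touches a given key of D).
theorem pvInner (d : List (String × Option String))
    (D : PySem.Dict String (Option String))
    (hD : D.keys.Nodup) (hd : (d.map Prod.fst).Nodup) :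
    (d.foldl pvUpdA D).items =
      D.items.map (fun kv => if pvBadB kv d then (kv.1, (none : Option String)) else kv) := by
  induction d generalizing D with
  | nil => simp [pvBadB]
  | cons hdp tl ih =>
    obtain ⟨k, v⟩ := hdp
    simp only [List.map_cons, List.nodup_cons, List.mem_map, not_exists] at hd
    obtain ⟨hknotin, htl⟩ := hd
    have htlk : (tl.any fun q => q.1 == k) = false := by
      simp only [List.any_eq_false]
      intro q hq
      simpa using fun h => hknotin q ⟨hq, h⟩
    simp only [List.foldl_cons]
    by_cases hc : D.contains k = true
    · by_cases hne : D.get? k = some v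
      · -- value already matches: A leaves D unchanged
        have hstep : pvUpdA D (k, v) = D := by
          simp [pvUpdA, hc, hne]
        rw [hstep, ih D hD htl]
        apply List.map_congr_left
        intro p hp
        have hgetp : D.get? p.1 = some p.2 :=
          PySem.Dict.get?_of_mem_items D (by simpa using hp) hD
        simp only [pvBadB, PySem.Dict.contains_mk, PySem.Dict.get?_mk_cons, List.any_cons]
        by_cases hpk : p.1 = k
        · have hp2 : p.2 = v := by
            rw [hpk, hne] at hgetp; exact (Option.some_inj.mp hgetp).symm
          have hkp : (k == p.1) = true := by simp [hpk]
          have htla : (tl.any fun q => q.1 == p.1) = false := by rw [hpk]; exact htlk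
          simp only [hkp, htla, hp2]
          simp
        · have hkp : (k == p.1) = false := by simpa using fun h => hpk h.symm
          simp only [hkp]
          rw [Bool.false_or, if_neg Bool.false_ne_true]
          rfl
      · -- mismatch: A nulls key k in place
        have hstep : pvUpdA D (k, v) = D.insert k none := by
          simp [pvUpdA, hc, bne_iff_ne, hne]
        have hitems : (D.insert k none).items =
            D.items.map (fun p => if p.1 == k then (k, (none : Option String)) else p) :=
          PySem.Dict.items_insert_of_contains D none hc
        have hkeys' : (D.insert k none).keys = D.keys :=
          PySem.Dict.keys_insert_of_contains D none hc
        rw [hstep, ih _ (hkeys' ▸ hD) htl, hitems, List.map_map]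
        apply List.map_congr_left
        intro p hp
        have hgetp : D.get? p.1 = some p.2 :=
          PySem.Dict.get?_of_mem_items D (by simpa using hp) hD
        simp only [Function.comp, pvBadB, PySem.Dict.contains_mk, PySem.Dict.get?_mk_cons,
          List.any_cons]
        by_cases hpk : p.1 = k
        · have hp2 : p.2 ≠ v := by
            intro h; rw [hpk] at hgetp; rw [h] at hgetp; exact hne hgetp
          simp only [hpk]
          simp [bne_iff_ne, Ne.symm hp2]
        · have hkp : (k == p.1) = false := by simpa using fun h => hpk h.symm
          have hpkb : (p.1 == k) = false := by simpa using hpk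
          simp only [hkp, hpkb]
          rw [Bool.false_or, if_neg Bool.false_ne_true]
          rfl
    · -- k not among results' keys: A leaves D unchanged, and no item of D has key k
      have hstep : pvUpdA D (k, v) = D := by
        simp [pvUpdA, hc]
      rw [hstep, ih D hD htl]
      apply List.map_congr_left
      intro p hp
      have hpk : p.1 ≠ k := by
        intro h
        apply hc
        exact (PySem.Dict.contains_iff_mem_keys D k).mpr
          (h ▸ PySem.Dict.mem_keys_of_mem_items D hp)
      have hkp : (k == p.1) = false := by simpa using fun h => hpk h.symm
      simp only [pvBadB, PySem.Dict.contains_mk, PySem.Dict.get?_mk_cons, List.any_cons]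
      simp only [hkp]
      rw [Bool.false_or, if_neg Bool.false_ne_true]
      rfl

-- A's whole fold over the later dicts acts entrywise on D.items as B's existential test:
-- a key already nulled stays nulled on both sides.
theorem pvOuter (rest : List (List (String × Option String)))
    (D : PySem.Dict String (Option String))
    (hD : D.keys.Nodup) (hrest : ∀ d ∈ rest, (d.map Prod.fst).Nodup) :
    (rest.foldl (fun results d => d.foldl pvUpdA results) D).items =
      D.items.map (fun kv => if rest.any (pvBadB kv) then (kv.1, (none : Option String)) else kv) := by
  induction rest generalizing D with
  | nil => simp
  | cons d rs ih =>
    simp only [List.foldl_cons]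
    have hd := hrest d (List.mem_cons_self ..)
    have hitems := pvInner d D hD hd
    have hkeys : (d.foldl pvUpdA D).keys = D.keys := by
      simp only [PySem.Dict.keys, hitems, List.map_map]
      apply List.map_congr_left
      intro p _
      by_cases h : pvBadB p d <;> simp [h]
    rw [ih _ (hkeys ▸ hD) (fun d' h => hrest d' (List.mem_cons_of_mem _ h)), hitems,
        List.map_map]
    apply List.map_congr_left
    intro kv _
    by_cases hb : pvBadB kv d
    · simp only [Function.comp_apply, hb, if_true, List.any_cons, Bool.true_or]
      by_cases h2 : rs.any (pvBadB (kv.1, (none : Option String)))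
      · simp [h2]
      · simp [h2]
    · simp [hb, List.any_cons]

-- ===== VERDICT (by name: the statement is the Claim_ definition above) =====
theorem intersect_dicts_spec : Claim_equal_intersect_dicts := by
  intro dicts _ hpre
  obtain ⟨hne, hnd⟩ := hpre
  match dicts with
  | [] => exact absurd rfl hne
  | d0 :: rest =>
    show intersect_dicts (d0 :: rest) = intersect_dicts_alt (d0 :: rest)
    have h0 : (PySem.Dict.mk d0).keys.Nodup := by
      simpa [PySem.Dict.keys] using hnd d0 (List.mem_cons_self ..)
    simp only [intersect_dicts, intersect_dicts_alt]
    rw [pvOuter rest (PySem.Dict.mk d0) h0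
        (fun d h => hnd d (List.mem_cons_of_mem _ h))]
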